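-- pv_equiv track=rewrite | github.com/bcisneros/A01796323_TC4017_10_Pruebas_26 | 4.2/P2/source/convertNumbers.py | parse_int_token
-- ===== SOURCE A (Python) =====
-- def parse_int_token(token):
--     """
--     Parse a token as a base-10 signed integer using basic character processing.
--     Accepts an optional leading '+' or '-'.
--     Returns:
--         int on success, or None if the token is not a valid integer.
--     """
--     if token is None:
--         return None
--     token = token.strip()
--     if token == "":
--         return None
--
--     sign = 1
--     start = 0
--
--     first = token[0]
--     if first == "+":
--         start = 1
--     elif first == "-":
--         sign = -1
--         start = 1
--
--     if start == len(token):
--         # Token is only '+' or '-' -> invalid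
--         return None
--
--     value = 0
--     for i in range(start, len(token)):
--         c = token[i]
--         if "0" <= c <= "9":
--             digit = ord(c) - ord("0")
--             value = value * 10 + digit
--         else:
--             # Any non-digit (e.g., '.', 'e', letters) invalidates the token
--             return None
--
--     return sign * value
-- ===== SOURCE B (Python) =====
-- def parse_int_token(token):
--     """
--     Parse a token as a base-10 signed integer.
--     Validates first (one pass), then converts right-to-left by place value.
--     """
--     if token is None:
--         return None
--     t = token.strip()
--     if t == "":
--         return None
--     sign = -1 if t[0] == '-' else 1
--     body = t[1:] if t[0] in '+-' else t
--     if body == "" or any(c < '0' or c > '9' for c in body):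
--         return None
--     total, place = 0, 1
--     for c in reversed(body):
--         total += (ord(c) - ord('0')) * place
--         place *= 10
--     return sign * total
-- ===== Notes on version B (the rewrite author's own statement) =====
-- stated objective: alternative
-- what changed: B separates a single validation pass (any non-digit check over the sign-stripped body) from the conversion, and converts right-to-left by accumulating digit*place with a growing power of ten, instead of A's left-to-right Horner accumulation interleaved with per-character validation and early returns.
import Mathlib
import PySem

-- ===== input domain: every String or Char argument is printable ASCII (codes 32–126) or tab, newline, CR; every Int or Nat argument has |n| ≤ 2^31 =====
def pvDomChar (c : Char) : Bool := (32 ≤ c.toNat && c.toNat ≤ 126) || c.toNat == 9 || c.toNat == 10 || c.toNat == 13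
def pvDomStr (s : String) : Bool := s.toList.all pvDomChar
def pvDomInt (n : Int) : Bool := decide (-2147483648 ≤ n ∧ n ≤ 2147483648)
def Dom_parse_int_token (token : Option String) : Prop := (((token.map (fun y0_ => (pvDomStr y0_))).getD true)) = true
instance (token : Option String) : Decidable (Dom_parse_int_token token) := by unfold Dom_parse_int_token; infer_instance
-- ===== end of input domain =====

-- B separates one validation pass from conversion and converts right-to-left by
-- place value, instead of A's interleaved left-to-right Horner accumulation
-- with early returns (objective: alternative; same O(n) cost).

-- ===== PORT A =====
-- A's 'for i in range(start, len(token))' with early return is ported as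
-- structural recursion over the remaining characters with the same state.
def pvLoopA (value : Int) (cs : List Char) : Option Int :=
  match cs with
  | [] => some value
  | c :: rest =>
    if '0' ≤ c ∧ c ≤ '9' then
      pvLoopA (value * 10 + ((c.toNat : Int) - ('0'.toNat : Int))) rest
    else none

def parse_int_token (token : Option String) : Option Int :=
  match token with
  | none => none
  | some tok =>
    let t := PySem.Str.strip tok
    match t.toList with
    | [] => none
    | first :: rest =>
      let sb : Int × List Char :=
        if first = '+' then (1, rest)
        else if first = '-' then (-1, rest)
        else (1, first :: rest)
      if sb.2.isEmpty then none
      else (pvLoopA 0 sb.2).map (fun v => sb.1 * v)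

-- ===== PORT B =====
-- B's 'for c in reversed(body)' loop maintaining (total, place).
def pvPosVal (cs : List Char) : Int :=
  (cs.reverse.foldl
    (fun (tp : Int × Int) c => (tp.1 + ((c.toNat : Int) - ('0'.toNat : Int)) * tp.2, tp.2 * 10))
    (0, 1)).1

def parse_int_token_alt (token : Option String) : Option Int :=
  match token with
  | none => none
  | some tok =>
    let t := PySem.Str.strip tok
    match t.toList with
    | [] => none
    | first :: rest =>
      let sign : Int := if first = '-' then -1 else 1
      let body := if first = '+' || first = '-' then rest else first :: rest
      if body.isEmpty || body.any (fun c => c < '0' || '9' < c) then none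
      else some (sign * pvPosVal body)

-- ===== PRECONDITION & SPEC =====
def Spec_parse_int_token (token : Option String) (out : Option Int) : Prop := out = parse_int_token_alt token
instance (token : Option String) (out : Option Int) : Decidable (Spec_parse_int_token token out) := by unfold Spec_parse_int_token; infer_instance

-- ===== CLAIM (what is proved, stated in full; the proofs are below) =====
def Claim_equal_parse_int_token : Prop := ∀ (token : Option String), Dom_parse_int_token token → Spec_parse_int_token token (parse_int_token token)

-- ===== LEMMAS AND PROOFS =====

-- A's loop succeeds iff every character is a digit, and then computes the Horner fold.
theorem pvLoopA_eq (cs : List Char) : ∀ (v : Int),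
    pvLoopA v cs =
      if cs.any (fun c => c < '0' || '9' < c) then none
      else some (cs.foldl (fun a c => a * 10 + ((c.toNat : Int) - ('0'.toNat : Int))) v) := by
  induction cs with
  | nil => intro v; simp [pvLoopA]
  | cons c rest ih =>
    intro v
    by_cases h : '0' ≤ c ∧ c ≤ '9'
    · have h1 : ¬ (c < '0' || '9' < c) = true := by
        simp only [Bool.or_eq_true, decide_eq_true_eq, not_or, not_lt]
        exact ⟨h.1, h.2⟩
      simp [pvLoopA, h, ih, List.any_cons, h1]
    · have h1 : (c < '0' || '9' < c) = true := by
        simp only [Bool.or_eq_true, decide_eq_true_eq]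
        rcases not_and_or.mp h with h' | h'
        · exact Or.inl (not_le.mp h')
        · exact Or.inr (not_le.mp h')
      simp [pvLoopA, h, List.any_cons, h1]

-- B's right-to-left pair fold: invariant over the reversed list.
theorem pvPairFold (ys : List Char) : ∀ (t p : Int),
    ys.foldl
      (fun (tp : Int × Int) c => (tp.1 + ((c.toNat : Int) - ('0'.toNat : Int)) * tp.2, tp.2 * 10))
      (t, p)
    = (t + p * (ys.reverse.foldl (fun a c => a * 10 + ((c.toNat : Int) - ('0'.toNat : Int))) 0),
       p * 10 ^ ys.length) := by
  induction ys with
  | nil => intro t p; simp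
  | cons c rest ih =>
    intro t p
    simp only [List.foldl_cons, ih, List.reverse_cons, List.foldl_append, List.foldl_cons,
      List.foldl_nil, List.length_cons, Prod.mk.injEq]
    constructor
    · ring
    · ring

theorem pvPosVal_eq (cs : List Char) :
    pvPosVal cs = cs.foldl (fun a c => a * 10 + ((c.toNat : Int) - ('0'.toNat : Int))) 0 := by
  unfold pvPosVal
  rw [pvPairFold]
  simp

-- ===== VERDICT (by name: the statement is the Claim_ definition above) =====
theorem parse_int_token_spec : Claim_equal_parse_int_token := by
  intro token _
  unfold Spec_parse_int_token parse_int_token parse_int_token_alt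
  match token with
  | none => rfl
  | some tok =>
    simp only
    match htl : (PySem.Str.strip tok).toList with
    | [] => rfl
    | first :: rest =>
      simp only
      by_cases hp : first = '+'
      · subst hp
        simp only [if_true]
        by_cases he : rest.isEmpty
        · simp [he]
        · simp only [he]
          rw [pvLoopA_eq]
          by_cases ha : rest.any (fun c => c < '0' || '9' < c)
          · simp [ha, he]
          · simp [ha, he, pvPosVal_eq]
      · by_cases hm : first = '-'
        · subst hm
          simp only [if_neg (by decide : ¬ ('-' : Char) = '+'), if_true]
          by_cases he : rest.isEmpty
          · simp [he]
          · simp only [he]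
            rw [pvLoopA_eq]
            by_cases ha : rest.any (fun c => c < '0' || '9' < c)
            · simp [ha, he]
            · simp [ha, he, pvPosVal_eq]
        · have hb : (first = '+' || first = '-') = false := by
            simp [hp, hm]
          simp only [if_neg hp, if_neg hm, hb]
          rw [pvLoopA_eq]
          by_cases ha : (first :: rest).any (fun c => c < '0' || '9' < c)
          · simp [ha]
          · simp [ha, pvPosVal_eq]
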